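-- pv_equiv track=rewrite | github.com/fengbinzhu/Doc2SoarGraph | etr/model/model_doc2soar.py | get_span_from_words
-- ===== SOURCE A (Python) =====
-- from typing import Dict, List
--
-- def get_span_from_words(token_tag_prediction, bz_selected_node_word_idx, bz_selected_node_words) -> List[str]:
--     spans = []
--     one_span = False
--     for i in range(len(token_tag_prediction)):
--         token2word_idx = int(bz_selected_node_word_idx[i])
--         if token_tag_prediction[i] == 2:
--             one_span = True
--             spans.append([token2word_idx, token2word_idx])
--         elif token_tag_prediction[i] == 1:
--             if one_span:
--                 spans[-1][-1] = token2word_idx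
--             else:
--                 one_span = False
--         elif token_tag_prediction[i] not in[1,2]:
--             one_span = False
--
--     selected_spans = [" ".join(bz_selected_node_words[s: e+1]) for s, e in spans]
--     return list(set(selected_spans))
-- ===== SOURCE B (Python) =====
-- from typing import List
--
--
-- def get_span_from_words(token_tag_prediction, bz_selected_node_word_idx, bz_selected_node_words) -> List[str]:
--     # Two-pointer run consumer: each tag-2 token opens a span; the run of
--     # tag-1 tokens immediately following it extends the span's end.
--     pairs = list(zip(token_tag_prediction, bz_selected_node_word_idx))
--     spans = []
--     i = 0
--     n = len(pairs)
--     while i < n: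
--         tag, w = pairs[i]
--         if tag == 2:
--             start = int(w)
--             end = start
--             i += 1
--             while i < n and pairs[i][0] == 1:
--                 end = int(pairs[i][1])
--                 i += 1
--             spans.append((start, end))
--         else:
--             i += 1
--     selected_spans = [" ".join(bz_selected_node_words[s: e + 1]) for s, e in spans]
--     return list(set(selected_spans))
-- ===== Notes on version B (the rewrite author's own statement) =====
-- stated objective: alternative
-- what changed: Replaces A's flag-based state machine (one_span flag, in-place mutation of the last span's end) with a two-pointer run consumer over the zipped (tag, word-index) pairs: each tag-2 opens a span and an inner loop consumes the following run of tag-1 tokens to fix its end.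
import Mathlib
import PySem

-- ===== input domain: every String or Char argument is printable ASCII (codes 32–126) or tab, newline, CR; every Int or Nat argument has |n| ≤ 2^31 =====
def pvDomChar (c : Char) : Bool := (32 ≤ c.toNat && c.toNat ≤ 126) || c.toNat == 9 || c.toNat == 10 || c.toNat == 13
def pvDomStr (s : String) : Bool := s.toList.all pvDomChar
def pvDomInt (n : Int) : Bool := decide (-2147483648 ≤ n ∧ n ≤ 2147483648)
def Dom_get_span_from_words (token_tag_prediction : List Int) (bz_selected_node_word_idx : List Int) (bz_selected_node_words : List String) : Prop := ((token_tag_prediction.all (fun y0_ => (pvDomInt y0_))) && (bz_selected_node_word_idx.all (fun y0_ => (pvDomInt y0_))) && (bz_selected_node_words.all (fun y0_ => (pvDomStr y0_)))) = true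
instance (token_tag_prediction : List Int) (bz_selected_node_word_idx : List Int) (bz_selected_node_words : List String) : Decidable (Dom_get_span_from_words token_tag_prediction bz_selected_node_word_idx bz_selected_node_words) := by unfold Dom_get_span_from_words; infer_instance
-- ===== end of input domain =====

-- B rewrites A's flag-based state machine as a two-pointer run consumer over the
-- zipped (tag, word-index) pairs; same objective, same cost (alternative decomposition).


-- ===== PORT A =====
-- spans[-1][-1] = t : replace the end of the last span; only reached with one_span
-- true, where spans is nonempty (the 'none' arm is unreachable then).
def updateLastEnd (spans : List (Int × Int)) (t : Int) : List (Int × Int) :=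
  match spans.getLast? with
  | some p => spans.dropLast ++ [(p.1, t)]
  | none => spans

-- A's loop body, on state (spans, one_span), branches in A's order.
def stepA (st : List (Int × Int) × Bool) (tag t : Int) : List (Int × Int) × Bool :=
  if tag = 2 then (st.1 ++ [(t, t)], true)
  else if tag = 1 then (if st.2 = true then (updateLastEnd st.1 t, st.2) else (st.1, false))
  else (st.1, false)

def get_span_from_words (token_tag_prediction : List Int) (bz_selected_node_word_idx : List Int) (bz_selected_node_words : List String) : List String :=
  let st := (PySem.List.pyRange 0 (token_tag_prediction.length : Int) 1).foldl
    (fun st i =>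
      -- int(bz_selected_node_word_idx[i]); IndexError excluded by Pre_
      let token2word_idx := PySem.List.pyGetD bz_selected_node_word_idx i 0
      stepA st (PySem.List.pyGetD token_tag_prediction i 0) token2word_idx)
    ([], false)
  let selected_spans := st.1.map (fun p =>
    PySem.Str.join " " (PySem.List.slice bz_selected_node_words (some p.1) (some (p.2 + 1))))
  PySem.Set.ofList selected_spans

-- ===== PORT B =====
-- inner while: consume the run of tag-1 pairs, tracking the last word index seen.
def consumeOnes : List (Int × Int) → Int → Int × List (Int × Int)
  | [], e => (e, [])
  | (tag, w) :: rest, e => if tag = 1 then consumeOnes rest w else (e, (tag, w) :: rest)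

-- outer while over the zipped pairs: a tag-2 pair opens a span, the following
-- run of tag-1 pairs extends it; anything else is skipped. The while loop is
-- ported with an explicit fuel bound (the list length) so it stays structural.
def altSpansFuel : Nat → List (Int × Int) → List (Int × Int)
  | 0, _ => []
  | _, [] => []
  | fuel + 1, (tag, w) :: rest =>
    if tag = 2 then
      let r := consumeOnes rest w
      (w, r.1) :: altSpansFuel fuel r.2
    else altSpansFuel fuel rest

def altSpans (l : List (Int × Int)) : List (Int × Int) := altSpansFuel l.length l

def get_span_from_words_alt (token_tag_prediction : List Int) (bz_selected_node_word_idx : List Int) (bz_selected_node_words : List String) : List String :=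
  let spans := altSpans (token_tag_prediction.zip bz_selected_node_word_idx)
  let selected_spans := spans.map (fun p =>
    PySem.Str.join " " (PySem.List.slice bz_selected_node_words (some p.1) (some (p.2 + 1))))
  PySem.Set.ofList selected_spans

-- ===== PRECONDITION & SPEC =====
-- A indexes bz_selected_node_word_idx[i] for every i below len(token_tag_prediction),
-- so it raises IndexError exactly when that list is shorter; Pre_ excludes only that.
def Pre_get_span_from_words (token_tag_prediction : List Int) (bz_selected_node_word_idx : List Int) (bz_selected_node_words : List String) : Prop :=
  token_tag_prediction.length ≤ bz_selected_node_word_idx.length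
instance (token_tag_prediction : List Int) (bz_selected_node_word_idx : List Int) (bz_selected_node_words : List String) : Decidable (Pre_get_span_from_words token_tag_prediction bz_selected_node_word_idx bz_selected_node_words) := by unfold Pre_get_span_from_words; infer_instance

def pvWitness_get_span_from_words : List Int × List Int × List String :=
  ([2, 1, 0, 2], [0, 1, 2, 0], ["a", "b", "c"])

def Spec_get_span_from_words (token_tag_prediction : List Int) (bz_selected_node_word_idx : List Int) (bz_selected_node_words : List String) (out : List String) : Prop := out = get_span_from_words_alt token_tag_prediction bz_selected_node_word_idx bz_selected_node_words
instance (token_tag_prediction : List Int) (bz_selected_node_word_idx : List Int) (bz_selected_node_words : List String) (out : List String) : Decidable (Spec_get_span_from_words token_tag_prediction bz_selected_node_word_idx bz_selected_node_words out) := by unfold Spec_get_span_from_words; infer_instance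

-- ===== CLAIM (what is proved, stated in full; the proofs are below) =====
def Claim_equal_get_span_from_words : Prop := ∀ (token_tag_prediction : List Int) (bz_selected_node_word_idx : List Int) (bz_selected_node_words : List String), Dom_get_span_from_words token_tag_prediction bz_selected_node_word_idx bz_selected_node_words → Pre_get_span_from_words token_tag_prediction bz_selected_node_word_idx bz_selected_node_words → Spec_get_span_from_words token_tag_prediction bz_selected_node_word_idx bz_selected_node_words (get_span_from_words token_tag_prediction bz_selected_node_word_idx bz_selected_node_words)

-- ===== LEMMAS AND PROOFS =====
theorem consumeOnes_len : ∀ (l : List (Int × Int)) (e : Int), (consumeOnes l e).2.length ≤ l.length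
  | [], _ => by simp [consumeOnes]
  | (tag, w) :: rest, e => by
    simp only [consumeOnes]
    split
    · exact le_trans (consumeOnes_len rest w) (Nat.le_succ _)
    · simp

-- index loop over two lists = fold over their zip (needs len xs ≤ len ys)
theorem foldl_pyRange_two {σ : Type} (f : σ → Int → Int → σ) :
    ∀ (xs ys : List Int), xs.length ≤ ys.length → ∀ (init : σ),
      (PySem.List.pyRange 0 (xs.length : Int) 1).foldl
        (fun st i => f st (PySem.List.pyGetD xs i 0) (PySem.List.pyGetD ys i 0)) init
      = (xs.zip ys).foldl (fun st p => f st p.1 p.2) init := by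
  intro xs
  induction xs with
  | nil => intro ys _ init; simp [PySem.List.pyRange_one_eq_nil]
  | cons x xs ih =>
    intro ys hlen init
    cases ys with
    | nil => simp at hlen
    | cons y ys =>
      simp only [List.length_cons, List.zip_cons_cons, List.foldl_cons]
      rw [PySem.List.pyRange_one_cons (by positivity), List.foldl_cons]
      have hr : PySem.List.pyRange ((0 : Int) + 1) ((xs.length + 1 : Nat) : Int) 1
          = (List.range xs.length).map (fun k => ((k + 1 : Nat) : Int)) := by
        rw [PySem.List.pyRange_one]
        have h : (((xs.length + 1 : Nat) : Int) - ((0 : Int) + 1)).toNat = xs.length := by omega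
        rw [h]
        apply List.map_congr_left
        intro k _
        push_cast; ring
      rw [hr, List.foldl_map]
      have hfun : (fun (st : σ) (k : Nat) =>
            f st (PySem.List.pyGetD (x :: xs) ((k + 1 : Nat) : Int) 0)
                 (PySem.List.pyGetD (y :: ys) ((k + 1 : Nat) : Int) 0))
          = (fun st k => f st (PySem.List.pyGetD xs ((k : Nat) : Int) 0)
                 (PySem.List.pyGetD ys ((k : Nat) : Int) 0)) := by
        funext st k
        rw [PySem.List.pyGetD_natCast, PySem.List.pyGetD_natCast,
            PySem.List.pyGetD_natCast, PySem.List.pyGetD_natCast]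
        simp
      rw [hfun]
      have := ih ys (by simpa using hlen) (f init (PySem.List.pyGetD (x :: xs) 0 0) (PySem.List.pyGetD (y :: ys) 0 0))
      rw [PySem.List.pyRange_one] at this
      simp only [Int.sub_zero, Int.toNat_natCast] at this
      rw [List.foldl_map] at this
      simp only [Int.zero_add] at this
      rw [this]
      simp [PySem.List.pyGetD_zero_cons]

theorem updateLastEnd_concat (spans : List (Int × Int)) (s e t : Int) :
    updateLastEnd (spans ++ [(s, e)]) t = spans ++ [(s, t)] := by
  simp [updateLastEnd]

theorem stepA_two (st : List (Int × Int) × Bool) (w : Int) :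
    stepA st 2 w = (st.1 ++ [(w, w)], true) := by simp [stepA]
theorem stepA_one_true (spans : List (Int × Int)) (w : Int) :
    stepA (spans, true) 1 w = (updateLastEnd spans w, true) := by simp [stepA]
theorem stepA_one_false (spans : List (Int × Int)) (w : Int) :
    stepA (spans, false) 1 w = (spans, false) := by simp [stepA]
theorem stepA_other (st : List (Int × Int) × Bool) (tag w : Int) (h2 : tag ≠ 2) (h1 : tag ≠ 1) :
    stepA st tag w = (st.1, false) := by simp [stepA, h1, h2]

-- altSpansFuel does not depend on the fuel once it covers the list length
theorem altSpansFuel_fuel_irrel : ∀ (f1 f2 : Nat) (l : List (Int × Int)),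
    l.length ≤ f1 → l.length ≤ f2 → altSpansFuel f1 l = altSpansFuel f2 l := by
  intro f1
  induction f1 with
  | zero =>
    intro f2 l h1 _
    have : l = [] := List.eq_nil_of_length_eq_zero (Nat.le_zero.mp h1)
    subst this
    cases f2 <;> simp [altSpansFuel]
  | succ f1 ih =>
    intro f2 l h1 h2
    cases l with
    | nil => cases f2 <;> simp [altSpansFuel]
    | cons hd tl =>
      obtain ⟨tag, w⟩ := hd
      cases f2 with
      | zero => simp at h2
      | succ f2 =>
        simp only [altSpansFuel]
        by_cases ht : tag = 2
        · simp only [if_pos ht]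
          have hc := consumeOnes_len tl w
          simp only [List.length_cons] at h1 h2
          exact congrArg _ (ih f2 _ (le_trans hc (by omega)) (le_trans hc (by omega)))
        · simp only [if_neg ht]
          simp only [List.length_cons] at h1 h2
          exact ih f2 tl (by omega) (by omega)

theorem altSpans_cons (tag w : Int) (rest : List (Int × Int)) :
    altSpans ((tag, w) :: rest)
      = if tag = 2 then (w, (consumeOnes rest w).1) :: altSpans ((consumeOnes rest w).2)
        else altSpans rest := by
  unfold altSpans
  simp only [List.length_cons, altSpansFuel]
  by_cases ht : tag = 2
  · simp only [if_pos ht]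
    exact congrArg _ (altSpansFuel_fuel_irrel _ _ _ (consumeOnes_len rest w) le_rfl)
  · simp only [if_neg ht]

-- A's state machine computes exactly B's two-pointer spans.
theorem foldl_stepA_altSpans : ∀ (l : List (Int × Int)),
    (∀ spans, (l.foldl (fun st p => stepA st p.1 p.2) (spans, false)).1 = spans ++ altSpans l) ∧
    (∀ spans s e, (l.foldl (fun st p => stepA st p.1 p.2) (spans ++ [(s, e)], true)).1
      = (spans ++ [(s, (consumeOnes l e).1)]) ++ altSpans ((consumeOnes l e).2)) := by
  intro l
  induction l with
  | nil => simp [altSpans, altSpansFuel, consumeOnes]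
  | cons hd tl ih =>
    obtain ⟨tag, w⟩ := hd
    constructor
    · intro spans
      rw [altSpans_cons, List.foldl_cons]
      show (List.foldl _ (stepA (spans, false) tag w) tl).1 = _
      by_cases h2 : tag = 2
      · subst h2
        rw [stepA_two]
        show (List.foldl _ (spans ++ [(w, w)], true) tl).1 = _
        rw [(ih.2) spans w w]
        simp
      · by_cases h1 : tag = 1
        · subst h1
          rw [stepA_one_false, (ih.1) spans, if_neg h2]
        · rw [stepA_other _ _ _ h2 h1, (ih.1) spans, if_neg h2]
    · intro spans s e
      rw [List.foldl_cons]
      show (List.foldl _ (stepA (spans ++ [(s, e)], true) tag w) tl).1 = _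
      by_cases h2 : tag = 2
      · subst h2
        rw [stepA_two]
        show (List.foldl _ ((spans ++ [(s, e)]) ++ [(w, w)], true) tl).1 = _
        rw [(ih.2) (spans ++ [(s, e)]) w w]
        have hc : consumeOnes ((2, w) :: tl) e = (e, (2, w) :: tl) := by
          simp [consumeOnes]
        rw [hc, altSpans_cons]
        simp
      · by_cases h1 : tag = 1
        · subst h1
          rw [stepA_one_true, updateLastEnd_concat, (ih.2) spans s w]
          have hc : consumeOnes ((1, w) :: tl) e = consumeOnes tl w := by
            simp [consumeOnes]
          rw [hc]
        · rw [stepA_other _ _ _ h2 h1]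
          show (List.foldl _ (spans ++ [(s, e)], false) tl).1 = _
          rw [(ih.1) (spans ++ [(s, e)])]
          have hc : consumeOnes ((tag, w) :: tl) e = (e, (tag, w) :: tl) := by
            simp [consumeOnes, h1]
          rw [hc, altSpans_cons, if_neg h2]

-- ===== VERDICT (by name: the statement is the Claim_ definition above) =====
theorem get_span_from_words_spec : Claim_equal_get_span_from_words := by
  intro ttp idx words _ hpre
  simp only [Spec_get_span_from_words, get_span_from_words, get_span_from_words_alt]
  rw [foldl_pyRange_two (fun st tag t => stepA st tag t) ttp idx hpre]
  rw [show ((ttp.zip idx).foldl (fun st p => stepA st p.1 p.2) ([], false)).1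
        = [] ++ altSpans (ttp.zip idx) from (foldl_stepA_altSpans (ttp.zip idx)).1 []]
  simp
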